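-- pv_equiv track=rewrite | github.com/AmeeraRayan/PythonKatasFursa | katas/is_valid_git_tree.py | is_valid_git_tree
-- ===== SOURCE A (Python) =====
-- def is_valid_git_tree(tree_map):
--     """
--     Determines if a given tree structure represents a valid Git tree.
--
--     A valid Git tree should:
--     1. Have exactly one root (no parent).
--     2. Contain no cycles.
--
--     Args:
--         tree_map: a dictionary representing the Git tree (commit ID to list of child commit IDs)
--
--     Returns:
--         True if the tree is a valid Git tree, False otherwise
--
--     """
--     all_nodes = set(tree_map.keys())
--     child_nodes = set(child for children in tree_map.values() for child in children)
--     roots = all_nodes - child_nodes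
--
--     if len(roots) != 1:
--         return False
--
--     root = next(iter(roots))
--     visited = set()
--     visiting = set()
--
--     def dfs(node):
--         if node in visiting:
--             return False  # cycle
--         if node in visited:
--             return True
--
--         visiting.add(node)
--         for child in tree_map.get(node, []):
--             if not dfs(child):
--                 return False
--         visiting.remove(node)
--         visited.add(node)
--         return True
--
--     if not dfs(root):
--         return False
--
--     return visited == all_nodes
-- ===== SOURCE B (Python) =====
-- def is_valid_git_tree(tree_map):
--     all_nodes = set(tree_map.keys())
--     child_nodes = set(child for children in tree_map.values() for child in children)
--     roots = all_nodes - child_nodes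
--
--     if len(roots) != 1:
--         return False
--
--     root = next(iter(roots))
--     visiting = set()
--     visited = set()
--     stack = [(root, False)]
--
--     while stack:
--         node, finished = stack.pop()
--         if finished:
--             # all children done: move node from the path to the settled set
--             visiting.discard(node)
--             visited.add(node)
--             continue
--         if node in visiting:
--             return False  # back edge to a node on the current path: cycle
--         if node in visited:
--             continue  # already settled (diamond)
--         visiting.add(node)
--         stack.append((node, True))  # completion marker
--         for child in reversed(tree_map.get(node, [])):
--             stack.append((child, False))
--
--     return visited == all_nodes
-- ===== Notes on version B (the rewrite author's own statement) =====
-- stated objective: alternative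
-- what changed: The recursive dfs with an implicit call stack is replaced by an explicit iterative DFS: a stack of (node, finished) entries with completion markers drives the same gray(visiting)/black(visited) cycle detection, so no recursion (and no Python recursion-depth limit) is involved.
import Mathlib
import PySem

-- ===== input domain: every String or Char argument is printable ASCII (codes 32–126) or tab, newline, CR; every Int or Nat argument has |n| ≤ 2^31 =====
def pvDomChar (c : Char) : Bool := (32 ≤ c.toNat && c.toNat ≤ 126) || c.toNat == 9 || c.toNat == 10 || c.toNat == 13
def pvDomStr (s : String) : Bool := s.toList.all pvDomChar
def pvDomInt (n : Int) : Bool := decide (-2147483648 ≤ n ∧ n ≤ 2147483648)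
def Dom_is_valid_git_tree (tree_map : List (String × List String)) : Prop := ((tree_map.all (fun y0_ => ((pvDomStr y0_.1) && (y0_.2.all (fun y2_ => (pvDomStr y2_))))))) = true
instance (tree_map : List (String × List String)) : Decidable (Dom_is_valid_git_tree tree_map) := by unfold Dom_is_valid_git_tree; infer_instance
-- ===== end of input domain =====

-- B replaces A's recursive dfs by an explicit iterative DFS (stack of (node, finished)
-- entries with completion markers, same visiting/visited cycle detection); same preamble,
-- same cost ('alternative', no speed claim).

-- ===== PORT A =====
-- A's recursive `dfs(node)` (closure over tree_map, visiting, visited), fueled; the fuel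
-- (number of distinct nodes + 1) is proved sufficient below (pvDfsA_suff), so `none`
-- (fuel exhausted) is never the value used by the port.
mutual
def pvDfsA (d : PySem.Dict String (List String)) : Nat → String → PySem.Set String → PySem.Set String → Option (Bool × PySem.Set String × PySem.Set String)
  | 0, _, _, _ => none
  | n + 1, node, visiting, visited =>
    if PySem.Set.contains visiting node then some (false, visiting, visited)
    else if PySem.Set.contains visited node then some (true, visiting, visited)
    else
      match pvDfsGoA d n (d.getD node []) (PySem.Set.add visiting node) visited with
      | none => none
      | some (false, vg, vd) => some (false, vg, vd)
      | some (true, vg, vd) =>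
        -- visiting.remove(node); visited.add(node); return True
        match PySem.Set.remove? vg node with
        | none => none
        | some vg' => some (true, vg', PySem.Set.add vd node)
  termination_by n _ _ _ => (n, 0)

-- the `for child in tree_map.get(node, []): if not dfs(child): return False` loop
def pvDfsGoA (d : PySem.Dict String (List String)) : Nat → List String → PySem.Set String → PySem.Set String → Option (Bool × PySem.Set String × PySem.Set String)
  | _, [], visiting, visited => some (true, visiting, visited)
  | n, c :: cs, visiting, visited =>
    match pvDfsA d n c visiting visited with
    | none => none
    | some (false, vg, vd) => some (false, vg, vd)
    | some (true, vg, vd) => pvDfsGoA d n cs vg vd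
  termination_by n cs _ _ => (n, cs.length + 1)
end

def is_valid_git_tree (tree_map : List (String × List String)) : Bool :=
  let d := PySem.Dict.ofList tree_map
  let all_nodes := PySem.Set.ofList d.keys
  let child_nodes := PySem.Set.ofList (d.values.flatMap (fun cs => cs))
  let roots := PySem.Set.diff all_nodes child_nodes
  match roots with          -- if len(roots) != 1: return False; root = next(iter(roots))
  | [root] =>
    let univ : PySem.Set String := PySem.Set.ofList (d.keys ++ d.values.flatMap (fun cs => cs))
    match pvDfsA d (univ.length + 1) root PySem.Set.empty PySem.Set.empty with
    | some (true, _, visited) => PySem.Set.equal visited all_nodes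
    | _ => false            -- `if not dfs(root): return False` (none is unreachable)
  | _ => false

-- ===== PORT B =====
-- B's `while stack:` loop, fueled; the fuel is proved sufficient below (pvLoopB_suff).
-- result: none = fuel exhausted (unreachable), some none = early `return False` (cycle),
-- some (some visited) = stack emptied with this final visited set.
def pvLoopB (d : PySem.Dict String (List String)) : Nat → List (String × Bool) → PySem.Set String → PySem.Set String → Option (Option (PySem.Set String))
  | 0, _, _, _ => none
  | _ + 1, [], _, visited => some (some visited)
  | n + 1, (node, true) :: rest, visiting, visited =>
      pvLoopB d n rest (PySem.Set.discard visiting node) (PySem.Set.add visited node)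
  | n + 1, (node, false) :: rest, visiting, visited =>
      if PySem.Set.contains visiting node then some none
      else if PySem.Set.contains visited node then pvLoopB d n rest visiting visited
      else
        -- push the completion marker, then the children in reversed order
        pvLoopB d n ((d.getD node []).reverse.foldl (fun s c => (c, false) :: s) ((node, true) :: rest))
          (PySem.Set.add visiting node) visited

-- `if len(roots) != 1: return False` + `root = next(iter(roots))`: the single root, if any
def pvTheRoot? : List String → Option String
  | [] => none
  | [root] => some root
  | _ :: _ :: _ => none

def is_valid_git_tree_alt (tree_map : List (String × List String)) : Bool :=
  let d := PySem.Dict.ofList tree_map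
  let all_nodes := PySem.Set.ofList d.keys
  let child_nodes := PySem.Set.ofList (d.values.flatMap (fun cs => cs))
  let roots := PySem.Set.diff all_nodes child_nodes
  match pvTheRoot? roots with
  | some root =>
    let univ : PySem.Set String := PySem.Set.ofList (d.keys ++ d.values.flatMap (fun cs => cs))
    let total := (d.values.flatMap (fun cs => cs)).length
    match pvLoopB d ((total + 2) * univ.length + 2) [(root, false)] PySem.Set.empty PySem.Set.empty with
    | some (some visited) => PySem.Set.equal visited all_nodes
    | some none => false      -- early `return False` (cycle)
    | none => false           -- fuel exhausted (proved unreachable)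
  | none => false

-- ===== PRECONDITION & SPEC =====
def Spec_is_valid_git_tree (tree_map : List (String × List String)) (out : Bool) : Prop := out = is_valid_git_tree_alt tree_map
instance (tree_map : List (String × List String)) (out : Bool) : Decidable (Spec_is_valid_git_tree tree_map out) := by unfold Spec_is_valid_git_tree; infer_instance

-- ===== CLAIM (what is proved, stated in full; the proofs are below) =====
def Claim_equal_is_valid_git_tree : Prop := ∀ (tree_map : List (String × List String)), Dom_is_valid_git_tree tree_map → Spec_is_valid_git_tree tree_map (is_valid_git_tree tree_map)

-- ===== LEMMAS AND PROOFS =====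

-- B's loop reaches a result (∃ fuel such that pvLoopB returns `some r`)
def pvExec (d : PySem.Dict String (List String)) (s : List (String × Bool)) (vg vd : PySem.Set String) (r : Option (PySem.Set String)) : Prop :=
  ∃ n, pvLoopB d n s vg vd = some r

-- more fuel cannot change a result already reached
lemma pvLoopB_mono (d : PySem.Dict String (List String)) :
    ∀ (n m : Nat) (s : List (String × Bool)) (vg vd : PySem.Set String) (r : Option (PySem.Set String)),
      pvLoopB d n s vg vd = some r → n ≤ m → pvLoopB d m s vg vd = some r := by
  intro n
  induction n with
  | zero => intro m s vg vd r h; simp [pvLoopB] at h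
  | succ n ih =>
    intro m s vg vd r h hm
    obtain ⟨m, rfl⟩ : ∃ m', m = m' + 1 := ⟨m - 1, by omega⟩
    match s with
    | [] => simpa [pvLoopB] using h
    | (node, true) :: rest =>
      simp only [pvLoopB] at h ⊢
      exact ih _ _ _ _ _ h (by omega)
    | (node, false) :: rest =>
      simp only [pvLoopB] at h ⊢
      split_ifs at h ⊢ with h1 h2
      · exact h
      · exact ih _ _ _ _ _ h (by omega)
      · exact ih _ _ _ _ _ h (by omega)

-- pushing the reversed children one by one = prepending them in order
lemma pvPush_eq (cs : List String) (t : List (String × Bool)) :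
    cs.reverse.foldl (fun s c => (c, false) :: s) t = cs.map (fun c => (c, false)) ++ t := by
  induction cs generalizing t with
  | nil => rfl
  | cons c cs ih => simp [List.foldl_append, ih]

-- adding a fresh element and then discarding it is the identity
lemma pvAddDiscard (vg : PySem.Set String) (node : String) (h : node ∉ vg) :
    PySem.Set.discard (PySem.Set.add vg node) node = vg := by
  rw [PySem.Set.add_of_not_mem h]
  simp only [PySem.Set.discard, List.filter_append]
  have h1 : vg.filter (fun y => !y == node) = vg := by
    apply List.filter_eq_self.mpr
    intro x hx
    simp only [Bool.not_eq_eq_eq_not, Bool.not_true, beq_eq_false_iff_ne, ne_eq]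
    intro he; exact h (he ▸ hx)
  simp [h1]

-- A's dfs restores `visiting` on a True return (visiting.add then visiting.remove)
lemma pvRestore (d : PySem.Dict String (List String)) :
    ∀ n : Nat,
      (∀ node vg vd vg' vd', pvDfsA d n node vg vd = some (true, vg', vd') → vg' = vg) ∧
      (∀ (cs : List String) vg vd vg' vd', pvDfsGoA d n cs vg vd = some (true, vg', vd') → vg' = vg) := by
  intro n
  induction n with
  | zero =>
    constructor
    · intro node vg vd vg' vd' h; simp [pvDfsA] at h
    · intro cs vg vd vg' vd' h
      cases cs with
      | nil => simp [pvDfsGoA] at h; exact h.1.symm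
      | cons c cs => simp [pvDfsGoA, pvDfsA] at h
  | succ n ih =>
    obtain ⟨ihA, ihG⟩ := ih
    have HA : ∀ node vg vd vg' vd', pvDfsA d (n + 1) node vg vd = some (true, vg', vd') → vg' = vg := by
      intro node vg vd vg' vd' h
      simp only [pvDfsA] at h
      split_ifs at h with h1 h2
      · simp at h
      · simp at h; exact h.1.symm
      · cases hgo : pvDfsGoA d n (d.getD node []) (PySem.Set.add vg node) vd with
        | none => rw [hgo] at h; simp at h
        | some res =>
          obtain ⟨b, vg2, vd2⟩ := res
          rw [hgo] at h
          cases b with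
          | false => simp at h
          | true =>
            have hvg2 : vg2 = PySem.Set.add vg node := ihG _ _ _ _ _ hgo
            have hnode : node ∉ vg := by simpa using h1
            have hc : PySem.Set.contains vg2 node = true := by
              rw [hvg2]
              rw [PySem.Set.contains_iff]
              exact (PySem.Set.mem_add _ _ _).mpr (Or.inr rfl)
            simp only [PySem.Set.remove?, hc, if_true] at h
            simp only [Option.some.injEq, Prod.mk.injEq] at h
            rw [← h.2.1, hvg2]
            exact pvAddDiscard vg node hnode
    refine ⟨HA, ?_⟩
    intro cs
    induction cs with
    | nil => intro vg vd vg' vd' h; simp [pvDfsGoA] at h; exact h.1.symm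
    | cons c cs ihcs =>
      intro vg vd vg' vd' h
      simp only [pvDfsGoA] at h
      cases ha : pvDfsA d (n + 1) c vg vd with
      | none => rw [ha] at h; simp at h
      | some res =>
        obtain ⟨b, vg2, vd2⟩ := res
        rw [ha] at h
        cases b with
        | false => simp at h
        | true =>
          have : vg2 = vg := HA _ _ _ _ _ ha
          rw [← this]
          exact ihcs _ _ _ _ h

-- single-step execution facts about B's loop
lemma pvExec_nil (d : PySem.Dict String (List String)) (vg vd : PySem.Set String) :
    pvExec d [] vg vd (some vd) := ⟨1, rfl⟩

lemma pvExec_marker (d : PySem.Dict String (List String)) {rest : List (String × Bool)} {vg vd : PySem.Set String} {node : String} {r : Option (PySem.Set String)}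
    (h : pvExec d rest (PySem.Set.discard vg node) (PySem.Set.add vd node) r) :
    pvExec d ((node, true) :: rest) vg vd r := by
  obtain ⟨n, hn⟩ := h
  exact ⟨n + 1, by simpa [pvLoopB] using hn⟩

lemma pvExec_gray (d : PySem.Dict String (List String)) {rest : List (String × Bool)} {vg : PySem.Set String} (vd : PySem.Set String) {node : String}
    (h1 : PySem.Set.contains vg node = true) :
    pvExec d ((node, false) :: rest) vg vd none := ⟨1, by simp only [pvLoopB, h1, if_true]⟩

lemma pvExec_black (d : PySem.Dict String (List String)) {rest : List (String × Bool)} {vg vd : PySem.Set String} {node : String} {r : Option (PySem.Set String)}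
    (h1 : PySem.Set.contains vg node = false) (h2 : PySem.Set.contains vd node = true)
    (h : pvExec d rest vg vd r) :
    pvExec d ((node, false) :: rest) vg vd r := by
  obtain ⟨n, hn⟩ := h
  exact ⟨n + 1, by simp only [pvLoopB, h1, h2, Bool.false_eq_true, if_false, if_true]; exact hn⟩

lemma pvExec_white (d : PySem.Dict String (List String)) {rest : List (String × Bool)} {vg vd : PySem.Set String} {node : String} {r : Option (PySem.Set String)}
    (h1 : PySem.Set.contains vg node = false) (h2 : PySem.Set.contains vd node = false)
    (h : pvExec d ((d.getD node []).map (fun c => (c, false)) ++ (node, true) :: rest) (PySem.Set.add vg node) vd r) :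
    pvExec d ((node, false) :: rest) vg vd r := by
  obtain ⟨n, hn⟩ := h
  refine ⟨n + 1, ?_⟩
  simp only [pvLoopB, h1, h2, Bool.false_eq_true, if_false, pvPush_eq]
  exact hn

-- correspondence: a finished call of A's dfs is simulated by B's loop on the matching stack
lemma pvCorr (d : PySem.Dict String (List String)) :
    ∀ n : Nat,
      (∀ node vg vd b vg' vd', pvDfsA d n node vg vd = some (b, vg', vd') →
        ∀ rest r, (b = true → pvExec d rest vg' vd' r → pvExec d ((node, false) :: rest) vg vd r) ∧
                  (b = false → pvExec d ((node, false) :: rest) vg vd none)) ∧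
      (∀ (cs : List String) vg vd b vg' vd', pvDfsGoA d n cs vg vd = some (b, vg', vd') →
        ∀ rest r, (b = true → pvExec d rest vg' vd' r → pvExec d (cs.map (fun c => (c, false)) ++ rest) vg vd r) ∧
                  (b = false → pvExec d (cs.map (fun c => (c, false)) ++ rest) vg vd none)) := by
  intro n
  induction n with
  | zero =>
    constructor
    · intro node vg vd b vg' vd' h; simp [pvDfsA] at h
    · intro cs vg vd b vg' vd' h rest r
      cases cs with
      | nil =>
        simp only [pvDfsGoA, Option.some.injEq, Prod.mk.injEq] at h
        obtain ⟨hb, hvg, hvd⟩ := h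
        subst hb hvg hvd
        exact ⟨fun _ he => he, fun hf => by simp at hf⟩
      | cons c cs => simp [pvDfsGoA, pvDfsA] at h
  | succ n ih =>
    obtain ⟨ihA, ihG⟩ := ih
    have HA : ∀ node vg vd b vg' vd', pvDfsA d (n + 1) node vg vd = some (b, vg', vd') →
        ∀ rest r, (b = true → pvExec d rest vg' vd' r → pvExec d ((node, false) :: rest) vg vd r) ∧
                  (b = false → pvExec d ((node, false) :: rest) vg vd none) := by
      intro node vg vd b vg' vd' h rest r
      simp only [pvDfsA] at h
      split_ifs at h with h1 h2
      · -- gray: cycle, returns False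
        simp only [Option.some.injEq, Prod.mk.injEq] at h
        obtain ⟨hb, _, _⟩ := h
        subst hb
        exact ⟨fun hf => by simp at hf, fun _ => pvExec_gray d vd h1⟩
      · -- black: returns True without change
        simp only [Option.some.injEq, Prod.mk.injEq] at h
        obtain ⟨hb, hvg, hvd⟩ := h
        subst hb hvg hvd
        refine ⟨fun _ he => pvExec_black d (by simpa using h1) h2 he, fun hf => by simp at hf⟩
      · -- white: expand
        cases hgo : pvDfsGoA d n (d.getD node []) (PySem.Set.add vg node) vd with
        | none => rw [hgo] at h; simp at h
        | some res =>
          obtain ⟨bg, vg2, vd2⟩ := res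
          rw [hgo] at h
          have h1' : PySem.Set.contains vg node = false := by simpa using h1
          have h2' : PySem.Set.contains vd node = false := by simpa using h2
          cases bg with
          | false =>
            simp only [Option.some.injEq, Prod.mk.injEq] at h
            obtain ⟨hb, _, _⟩ := h
            subst hb
            refine ⟨fun hf => by simp at hf, fun _ => ?_⟩
            have := (ihG _ _ _ _ _ _ hgo ((node, true) :: rest) r).2 rfl
            exact pvExec_white d h1' h2' this
          | true =>
            have hc : PySem.Set.contains vg2 node = true := by
              rw [PySem.Set.contains_iff, (pvRestore d n).2 _ _ _ _ _ hgo]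
              exact (PySem.Set.mem_add _ _ _).mpr (Or.inr rfl)
            simp only [PySem.Set.remove?, hc, if_true, Option.some.injEq, Prod.mk.injEq] at h
            obtain ⟨hb, hvg, hvd⟩ := h
            subst hb
            refine ⟨fun _ he => ?_, fun hf => by simp at hf⟩
            apply pvExec_white d h1' h2'
            refine (ihG _ _ _ _ _ _ hgo ((node, true) :: rest) r).1 rfl ?_
            apply pvExec_marker
            rw [← hvg, ← hvd] at he
            exact he
    refine ⟨HA, ?_⟩
    intro cs
    induction cs with
    | nil =>
      intro vg vd b vg' vd' h rest r
      simp only [pvDfsGoA, Option.some.injEq, Prod.mk.injEq] at h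
      obtain ⟨hb, hvg, hvd⟩ := h
      subst hb hvg hvd
      exact ⟨fun _ he => he, fun hf => by simp at hf⟩
    | cons c cs ihcs =>
      intro vg vd b vg' vd' h rest r
      simp only [pvDfsGoA] at h
      cases ha : pvDfsA d (n + 1) c vg vd with
      | none => rw [ha] at h; simp at h
      | some res =>
        obtain ⟨ba, vg2, vd2⟩ := res
        rw [ha] at h
        cases ba with
        | false =>
          simp only [Option.some.injEq, Prod.mk.injEq] at h
          obtain ⟨hb, _, _⟩ := h
          subst hb
          refine ⟨fun hf => by simp at hf, fun _ => ?_⟩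
          exact (HA _ _ _ _ _ _ ha (cs.map (fun c => (c, false)) ++ rest) r).2 rfl
        | true =>
          refine ⟨fun hb he => ?_, fun hb => ?_⟩
          · subst hb
            exact (HA _ _ _ _ _ _ ha _ r).1 rfl ((ihcs _ _ _ _ _ h rest r).1 rfl he)
          · subst hb
            exact (HA _ _ _ _ _ _ ha _ none).1 rfl ((ihcs _ _ _ _ _ h rest r).2 rfl)

-- every child list stored in the dict is a sublist of the flattened child list
lemma pvChildren_sub (d : PySem.Dict String (List String)) (node : String) :
    ∀ c ∈ d.getD node [], c ∈ d.values.flatMap (fun cs => cs) := by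
  intro c hc
  rw [PySem.Dict.getD_eq_get?_getD] at hc
  cases hg : d.get? node with
  | none => rw [hg] at hc; simp at hc
  | some v =>
    rw [hg] at hc
    simp only [Option.getD_some] at hc
    have := PySem.Dict.mem_items_of_get?_eq_some _ hg
    exact List.mem_flatMap.mpr ⟨v, List.mem_map_of_mem this, hc⟩

lemma pvChildren_len (d : PySem.Dict String (List String)) (node : String) :
    (d.getD node []).length ≤ (d.values.flatMap (fun cs => cs)).length := by
  rw [PySem.Dict.getD_eq_get?_getD]
  cases hg : d.get? node with
  | none => simp
  | some v =>
    simp only [Option.getD_some]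
    have hmem : v ∈ d.values := List.mem_map_of_mem (PySem.Dict.mem_items_of_get?_eq_some _ hg)
    have : v.Sublist (d.values.flatMap (fun cs => cs)) := by
      simpa using List.sublist_flatten_of_mem (by simpa using hmem)
    exact this.length_le

-- a duplicate-free list contained in another list is no longer than it
lemma pvNodupLen (l1 l2 : List String) (h : l1.Nodup) (hs : ∀ x ∈ l1, x ∈ l2) :
    l1.length ≤ l2.length :=
  calc l1.length = l1.toFinset.card := (List.toFinset_card_of_nodup h).symm
    _ ≤ l2.toFinset.card := Finset.card_le_card (fun x hx => List.mem_toFinset.mpr (hs x (List.mem_toFinset.mp hx)))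
    _ ≤ l2.length := l2.toFinset_card_le

-- fuel sufficiency for A's dfs
lemma pvDfsA_suff (d : PySem.Dict String (List String)) (U : PySem.Set String)
    (hU : U = PySem.Set.ofList (d.keys ++ d.values.flatMap (fun cs => cs))) :
    ∀ n : Nat,
      (∀ node vg vd, node ∈ U → vg.Nodup → (∀ x ∈ vg, x ∈ U) → U.length < n + vg.length →
        (pvDfsA d n node vg vd).isSome) ∧
      (∀ (cs : List String) vg vd, (∀ c ∈ cs, c ∈ U) → vg.Nodup → (∀ x ∈ vg, x ∈ U) → U.length < n + vg.length →
        (pvDfsGoA d n cs vg vd).isSome) := by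
  have hUnodup : U.Nodup := hU ▸ PySem.Set.nodup_ofList _
  have hflat : ∀ c, c ∈ d.values.flatMap (fun cs => cs) → c ∈ U := by
    intro c hc; rw [hU, PySem.Set.mem_ofList]; exact List.mem_append_right _ hc
  intro n
  induction n with
  | zero =>
    constructor
    · intro node vg vd _ hnd hsub hlen
      exact absurd (pvNodupLen vg U hnd hsub) (by omega)
    · intro cs vg vd _ hnd hsub hlen
      exact absurd (pvNodupLen vg U hnd hsub) (by omega)
  | succ n ih =>
    obtain ⟨ihA, ihG⟩ := ih
    have HA : ∀ node vg vd, node ∈ U → vg.Nodup → (∀ x ∈ vg, x ∈ U) → U.length < (n + 1) + vg.length →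
        (pvDfsA d (n + 1) node vg vd).isSome := by
      intro node vg vd hn hnd hsub hlen
      simp only [pvDfsA]
      split_ifs with h1 h2
      · simp
      · simp
      · have hnotmem : node ∉ vg := by simpa [PySem.Set.contains_iff] using h1
        have haddlen : (PySem.Set.add vg node).length = vg.length + 1 := by
          rw [PySem.Set.add_of_not_mem hnotmem]; simp
        have hgo := ihG (d.getD node []) (PySem.Set.add vg node) vd
          (fun c hc => hflat c (pvChildren_sub d node c hc))
          (PySem.Set.nodup_add _ _ hnd)
          (fun x hx => by
            rcases (PySem.Set.mem_add _ _ _).mp hx with hx | hx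
            · exact hsub x hx
            · exact hx ▸ hn)
          (by omega)
        cases hgo' : pvDfsGoA d n (d.getD node []) (PySem.Set.add vg node) vd with
        | none => rw [hgo'] at hgo; simp at hgo
        | some res =>
          obtain ⟨b, vg2, vd2⟩ := res
          cases b with
          | false => simp
          | true =>
            have hvg2 : vg2 = PySem.Set.add vg node := (pvRestore d n).2 _ _ _ _ _ hgo'
            have hmem : node ∈ vg2 := by
              rw [hvg2]; exact (PySem.Set.mem_add _ _ _).mpr (Or.inr rfl)
            simp [PySem.Set.remove?, hmem]
    refine ⟨HA, ?_⟩
    intro cs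
    induction cs with
    | nil => intro vg vd _ _ _ _; simp [pvDfsGoA]
    | cons c cs ihcs =>
      intro vg vd hcs hnd hsub hlen
      have hA := HA c vg vd (hcs c (List.mem_cons_self)) hnd hsub hlen
      simp only [pvDfsGoA]
      cases ha : pvDfsA d (n + 1) c vg vd with
      | none => rw [ha] at hA; simp at hA
      | some res =>
        obtain ⟨b, vg2, vd2⟩ := res
        cases b with
        | false => simp
        | true =>
          have hvg2 : vg2 = vg := (pvRestore d (n + 1)).1 _ _ _ _ _ ha
          rw [hvg2]
          exact ihcs _ vd2 (fun x hx => hcs x (List.mem_cons_of_mem _ hx)) hnd hsub hlen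

lemma pvContainsFalse (s : PySem.Set String) (x : String) :
    PySem.Set.contains s x = false ↔ x ∉ s := by
  rw [← PySem.Set.contains_iff]
  cases h : PySem.Set.contains s x <;> simp

-- a pointwise-stronger filter is a sublist of the weaker one
lemma pvFilterSub (l : List String) (p q : String → Bool) (himp : ∀ x ∈ l, p x = true → q x = true) :
    (l.filter p).Sublist (l.filter q) := by
  have : l.filter p = (l.filter q).filter p := by
    rw [List.filter_filter]
    apply (List.filter_congr ?_).symm
    intro x hx
    cases hp : p x
    · simp
    · simp [himp x hx hp]
  rw [this]
  exact List.filter_sublist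

lemma pvFilterLt (l : List String) (p q : String → Bool) (himp : ∀ x ∈ l, p x = true → q x = true)
    (x0 : String) (hx0 : x0 ∈ l) (hp : p x0 = false) (hq : q x0 = true) :
    (l.filter p).length < (l.filter q).length := by
  have hsub := pvFilterSub l p q himp
  refine lt_of_le_of_ne hsub.length_le (fun heq => ?_)
  have : l.filter p = l.filter q := hsub.eq_of_length heq
  have hmem : x0 ∈ l.filter q := List.mem_filter.mpr ⟨hx0, hq⟩
  rw [← this] at hmem
  exact absurd (List.mem_filter.mp hmem).2 (by simp [hp])

-- fuel sufficiency for B's loop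
lemma pvLoopB_suff (d : PySem.Dict String (List String)) (U : PySem.Set String)
    (hU : U = PySem.Set.ofList (d.keys ++ d.values.flatMap (fun cs => cs))) :
    ∀ (n : Nat) (s : List (String × Bool)) (vg vd : PySem.Set String),
      (∀ x, (x, false) ∈ s → x ∈ U) →
      ((d.values.flatMap (fun cs => cs)).length + 2) *
          (U.filter (fun x => !(PySem.Set.contains vg x) && !(PySem.Set.contains vd x))).length + s.length < n →
      (pvLoopB d n s vg vd).isSome := by
  have hflat : ∀ c, c ∈ d.values.flatMap (fun cs => cs) → c ∈ U := by
    intro c hc; rw [hU, PySem.Set.mem_ofList]; exact List.mem_append_right _ hc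
  set S := (d.values.flatMap (fun cs => cs)).length with hS
  intro n
  induction n with
  | zero => intro s vg vd _ hlen; omega
  | succ n ih =>
    intro s vg vd hs hlen
    match s with
    | [] => simp [pvLoopB]
    | (node, true) :: rest =>
      simp only [pvLoopB]
      apply ih rest _ _ (fun x hx => hs x (List.mem_cons_of_mem _ hx))
      have hmono : (U.filter (fun x => !(PySem.Set.contains (PySem.Set.discard vg node) x) && !(PySem.Set.contains (PySem.Set.add vd node) x))).length ≤
          (U.filter (fun x => !(PySem.Set.contains vg x) && !(PySem.Set.contains vd x))).length := by
        apply (pvFilterSub _ _ _ ?_).length_le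
        intro x _ hx
        simp only [Bool.and_eq_true, Bool.not_eq_eq_eq_not, Bool.not_true] at hx ⊢
        obtain ⟨ha, hb⟩ := hx
        have hbv : x ∉ PySem.Set.add vd node := (pvContainsFalse _ _).mp hb
        have hxne : x ≠ node := fun he => hbv ((PySem.Set.mem_add _ _ _).mpr (Or.inr he))
        have hav : x ∉ PySem.Set.discard vg node := (pvContainsFalse _ _).mp ha
        constructor
        · exact (pvContainsFalse _ _).mpr (fun hm => hav ((PySem.Set.mem_discard _ _ _).mpr ⟨hm, hxne⟩))
        · exact (pvContainsFalse _ _).mpr (fun hm => hbv ((PySem.Set.mem_add _ _ _).mpr (Or.inl hm)))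
      simp only [List.length_cons] at hlen
      have := Nat.mul_le_mul_left (S + 2) hmono
      omega
    | (node, false) :: rest =>
      simp only [pvLoopB]
      split_ifs with h1 h2
      · simp
      · apply ih rest _ _ (fun x hx => hs x (List.mem_cons_of_mem _ hx))
        simp only [List.length_cons] at hlen
        omega
      · rw [pvPush_eq]
        have hnode : node ∈ U := hs node List.mem_cons_self
        have hng : node ∉ vg := (pvContainsFalse _ _).mp (by simpa using h1)
        have hnd : node ∉ vd := (pvContainsFalse _ _).mp (by simpa using h2)
        apply ih _ _ _ ?inv ?len
        case inv =>
          intro x hx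
          rcases List.mem_append.mp hx with hx | hx
          · obtain ⟨c, hc, he⟩ := List.mem_map.mp hx
            cases he
            exact hflat _ (pvChildren_sub d node _ hc)
          · rcases List.mem_cons.mp hx with hx | hx
            · simp at hx
            · exact hs x (List.mem_cons_of_mem _ hx)
        case len =>
          have hcadd : PySem.Set.contains (PySem.Set.add vg node) node = true := by
            rw [PySem.Set.contains_iff]; exact (PySem.Set.mem_add _ _ _).mpr (Or.inr rfl)
          have hlt : (U.filter (fun x => !(PySem.Set.contains (PySem.Set.add vg node) x) && !(PySem.Set.contains vd x))).length <
              (U.filter (fun x => !(PySem.Set.contains vg x) && !(PySem.Set.contains vd x))).length := by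
            refine pvFilterLt _ _ _ ?_ node hnode (by simp only [hcadd, Bool.not_true, Bool.false_and]) ?_
            · intro x _ hx
              simp only [Bool.and_eq_true, Bool.not_eq_eq_eq_not, Bool.not_true] at hx ⊢
              obtain ⟨ha, hb⟩ := hx
              have hav : x ∉ PySem.Set.add vg node := (pvContainsFalse _ _).mp ha
              exact ⟨(pvContainsFalse _ _).mpr (fun hm => hav ((PySem.Set.mem_add _ _ _).mpr (Or.inl hm))), hb⟩
            · simp only [Bool.and_eq_true, Bool.not_eq_eq_eq_not, Bool.not_true]
              exact ⟨(pvContainsFalse _ _).mpr hng, (pvContainsFalse _ _).mpr hnd⟩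
          have hcs : (d.getD node []).length ≤ S := pvChildren_len d node
          simp only [List.length_append, List.length_map, List.length_cons] at *
          have := Nat.mul_le_mul_left (S + 2) (Nat.succ_le_of_lt hlt)
          rw [Nat.mul_succ] at this
          omega

-- B's loop is deterministic across fuels
lemma pvExecDet (d : PySem.Dict String (List String)) {s : List (String × Bool)} {vg vd : PySem.Set String}
    {r r' : Option (PySem.Set String)} {m : Nat}
    (h : pvExec d s vg vd r) (h2 : pvLoopB d m s vg vd = some r') : r = r' := by
  obtain ⟨n, hn⟩ := h
  have e1 := pvLoopB_mono d n (max n m) s vg vd r hn (Nat.le_max_left _ _)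
  have e2 := pvLoopB_mono d m (max n m) s vg vd r' h2 (Nat.le_max_right _ _)
  rw [e1] at e2
  exact (Option.some.injEq _ _ ▸ e2)

-- the two ports agree on every input
lemma pvMain (tree_map : List (String × List String)) :
    is_valid_git_tree tree_map = is_valid_git_tree_alt tree_map := by
  simp only [is_valid_git_tree, is_valid_git_tree_alt]
  set d := PySem.Dict.ofList tree_map with hd
  set U : PySem.Set String := PySem.Set.ofList (d.keys ++ d.values.flatMap (fun cs => cs)) with hU
  set S : Nat := (d.values.flatMap (fun cs => cs)).length with hS
  cases hr : PySem.Set.diff (PySem.Set.ofList d.keys) (PySem.Set.ofList (d.values.flatMap (fun cs => cs))) with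
  | nil => rfl
  | cons root tl =>
    cases tl with
    | cons b tl2 => rfl
    | nil =>
      -- the single root lies in the node universe U
      have hrootU : root ∈ U := by
        have hmem : root ∈ PySem.Set.diff (PySem.Set.ofList d.keys) (PySem.Set.ofList (d.values.flatMap (fun cs => cs))) := by
          rw [hr]; exact List.mem_singleton.mpr rfl
        have h2 := ((PySem.Set.mem_diff _ _ _).mp hmem).1
        rw [PySem.Set.mem_ofList] at h2
        rw [hU, PySem.Set.mem_ofList]
        exact List.mem_append_left _ h2
      -- A's dfs finishes within its fuel
      have hA := (pvDfsA_suff d U hU (U.length + 1)).1 root PySem.Set.empty PySem.Set.empty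
        hrootU List.nodup_nil (by intro x hx; simp [PySem.Set.empty] at hx) (by simp [PySem.Set.empty])
      -- B's loop finishes within its fuel
      have hB := pvLoopB_suff d U hU ((S + 2) * U.length + 2) [(root, false)] PySem.Set.empty PySem.Set.empty
        (by intro x hx; simp at hx; rw [hx]; exact hrootU)
        (by
          have hf : (U.filter (fun x => !(PySem.Set.contains PySem.Set.empty x) && !(PySem.Set.contains PySem.Set.empty x))).length ≤ U.length :=
            List.length_filter_le _ _
          have := Nat.mul_le_mul_left (S + 2) hf
          simp only [List.length_cons, List.length_nil]
          rw [← hS]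
          omega)
      cases hres : pvDfsA d (U.length + 1) root PySem.Set.empty PySem.Set.empty with
      | none => rw [hres] at hA; simp at hA
      | some res =>
        obtain ⟨bA, vgA, vdA⟩ := res
        cases hlb : pvLoopB d ((S + 2) * U.length + 2) [(root, false)] PySem.Set.empty PySem.Set.empty with
        | none => rw [hlb] at hB; simp at hB
        | some r =>
          cases bA with
          | false =>
            have hex : pvExec d [(root, false)] PySem.Set.empty PySem.Set.empty none :=
              ((pvCorr d _).1 _ _ _ _ _ _ hres [] none).2 rfl
            have : r = none := (pvExecDet d hex hlb).symm
            dsimp only [pvTheRoot?]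
            rw [hres, hlb, this]
          | true =>
            have hex : pvExec d [(root, false)] PySem.Set.empty PySem.Set.empty (some vdA) :=
              ((pvCorr d _).1 _ _ _ _ _ _ hres [] (some vdA)).1 rfl (pvExec_nil d vgA vdA)
            have : r = some vdA := (pvExecDet d hex hlb).symm
            dsimp only [pvTheRoot?]
            rw [hres, hlb, this]

-- ===== VERDICT (by name: the statement is the Claim_ definition above) =====
theorem is_valid_git_tree_spec : Claim_equal_is_valid_git_tree := by
  intro tm _
  unfold Spec_is_valid_git_tree
  exact pvMain tm
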